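-- pv_equiv track=rewrite | github.com/tjm165/eecs-297-397 | assignment-003/assignment3.py | store_checkout
-- ===== SOURCE A (Python) =====
-- def store_checkout(inventory_tuple_list, item_purchase_list):
--     """
--     inventory_tuple_list:
--         A list of tuples. Each tuple has a string representing an
--         item name, an int representing a price, and a string representing
--         a description.
--
--         Example: [("A", 5, "shiny new A"), ("B", 10, "big heavy B")]
--     """
--
--     # First, lets put all the inventory items into a name to price dictionary
--     inventory_name_to_price = {}
--     for item in inventory_tuple_list:
--         inventory_name_to_price[item[0]] = item[1]
--
--     """
--     item_purchase_list:
--         A list of strings. Each string represents an item name.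
--
--         Example: ["A", "A", "B", "C"]
--
--     Return the total price of the items in item_purchase_list by using
--     prices from the provided inventory_tuple_list. If an item does not
--     have a price, it is free. The descriptions are extra, useless
--     information for this function.
--
--     The example inputs here would have a total cost of:
--     5 + 5 + 10 + 0 = 20
--     """
--     # next let's go through the purchase list.
--     # We can use the name to price dicionary to quickly get the prices
--     total_price = 0
--     for item in item_purchase_list:
--         if item in inventory_name_to_price:
--             total_price += inventory_name_to_price[item]
--
--     return total_price
-- ===== SOURCE B (Python) =====
-- from collections import Counter
--
-- def store_checkout(inventory_tuple_list, item_purchase_list):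
--     counts = Counter(item_purchase_list)
--     total = 0
--     seen = set()
--     for name, price, _desc in reversed(inventory_tuple_list):
--         if name not in seen:
--             seen.add(name)
--             total += price * counts.get(name, 0)
--     return total
-- ===== Notes on version B (the rewrite author's own statement) =====
-- stated objective: alternative
-- what changed: B builds no name-to-price dict at all: it walks the INVENTORY back-to-front with a seen-set (so the last duplicate wins) and adds price * purchase-count (from a Counter over the purchases) for each distinct inventory name, instead of A's dict build plus per-purchase lookup loop.
import Mathlib
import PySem

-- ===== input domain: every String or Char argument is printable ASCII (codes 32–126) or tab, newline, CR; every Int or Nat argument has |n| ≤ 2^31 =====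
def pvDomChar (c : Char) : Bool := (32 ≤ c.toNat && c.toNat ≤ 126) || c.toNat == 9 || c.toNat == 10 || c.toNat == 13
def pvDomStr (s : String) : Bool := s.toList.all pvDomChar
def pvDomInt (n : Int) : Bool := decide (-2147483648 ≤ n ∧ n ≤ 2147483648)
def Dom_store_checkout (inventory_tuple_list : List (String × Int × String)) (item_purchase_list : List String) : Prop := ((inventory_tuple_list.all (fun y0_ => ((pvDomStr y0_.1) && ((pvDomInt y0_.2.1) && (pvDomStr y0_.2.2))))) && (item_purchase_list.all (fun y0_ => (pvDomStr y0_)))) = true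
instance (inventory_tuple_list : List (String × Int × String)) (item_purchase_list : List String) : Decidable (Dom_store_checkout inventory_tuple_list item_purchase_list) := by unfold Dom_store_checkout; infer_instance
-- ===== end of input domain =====

-- B builds no name→price dict: it walks the inventory back-to-front with a seen-set
-- (last duplicate wins) and adds price * purchase-count per distinct inventory name
-- (alternative decomposition, same cost).

-- ===== PORT A =====
def store_checkout (inventory_tuple_list : List (String × Int × String)) (item_purchase_list : List String) : Int :=
  let inventory_name_to_price : PySem.Dict String Int :=
    inventory_tuple_list.foldl (fun d item => d.insert item.1 item.2.1) PySem.Dict.empty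
  item_purchase_list.foldl
    (fun total_price item =>
      if inventory_name_to_price.contains item then
        total_price + inventory_name_to_price.getD item 0
      else total_price) 0

-- ===== PORT B =====
def store_checkout_alt (inventory_tuple_list : List (String × Int × String)) (item_purchase_list : List String) : Int :=
  let counts : PySem.Dict String Int := PySem.Dict.counter item_purchase_list
  (inventory_tuple_list.reverse.foldl
    (fun (st : PySem.Set String × Int) item =>
      if PySem.Set.contains st.1 item.1 then st
      else (PySem.Set.add st.1 item.1, st.2 + item.2.1 * counts.getD item.1 0))
    ((PySem.Set.empty : PySem.Set String), 0)).2

-- ===== PRECONDITION & SPEC =====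
def Spec_store_checkout (inventory_tuple_list : List (String × Int × String)) (item_purchase_list : List String) (out : Int) : Prop := out = store_checkout_alt inventory_tuple_list item_purchase_list
instance (inventory_tuple_list : List (String × Int × String)) (item_purchase_list : List String) (out : Int) : Decidable (Spec_store_checkout inventory_tuple_list item_purchase_list out) := by unfold Spec_store_checkout; infer_instance

-- ===== CLAIM (what is proved, stated in full; the proofs are below) =====
def Claim_equal_store_checkout : Prop := ∀ (inventory_tuple_list : List (String × Int × String)) (item_purchase_list : List String), Dom_store_checkout inventory_tuple_list item_purchase_list → Spec_store_checkout inventory_tuple_list item_purchase_list (store_checkout inventory_tuple_list item_purchase_list)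

-- ===== LEMMAS AND PROOFS =====

-- A's per-item accumulation is the sum of `getD · 0` over the purchase list
-- (a missing key contributes 0 either way).
theorem foldA_eq_sum_map (d : PySem.Dict String Int) (l : List String) :
    l.foldl (fun t x => if d.contains x then t + d.getD x 0 else t) 0
      = (l.map (fun x => d.getD x 0)).sum := by
  have hfun : (fun t x => if d.contains x then t + d.getD x 0 else t)
      = (fun t x => t + d.getD x 0) := by
    funext t x
    by_cases h : d.contains x = true
    · simp [h]
    · have h0 : d.getD x 0 = 0 :=
        PySem.Dict.getD_of_not_contains d 0 (by simpa using h)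
      simp [h, h0]
  rw [hfun]
  simpa using PySem.List.foldl_add (l := l) (g := fun x => d.getD x 0) (a := 0)

-- later inserts override earlier ones: the dict fold's start matters only off the keys
theorem getD_foldl_insert_override (l : List (String × Int × String))
    (d : PySem.Dict String Int) (k : String) :
    (l.foldl (fun d q => d.insert q.1 q.2.1) d).getD k 0
      = if k ∈ l.map (·.1) then
          (l.foldl (fun d q => d.insert q.1 q.2.1) PySem.Dict.empty).getD k 0
        else d.getD k 0 := by
  induction l generalizing d with
  | nil => simp
  | cons y l ih =>
    simp only [List.foldl_cons, List.map_cons, List.mem_cons]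
    rw [ih (d.insert y.1 y.2.1), ih (PySem.Dict.empty.insert y.1 y.2.1)]
    by_cases hl : k ∈ l.map (·.1)
    · simp [hl]
    · by_cases hk : k = y.1 <;>
        simp [hl, hk, PySem.Dict.getD_insert]

theorem sum_map_if_eq (l : List String) (k : String) (v : Int) :
    (l.map (fun p => if p = k then v else 0)).sum = v * (l.count k : Int) := by
  induction l with
  | nil => simp
  | cons x l ih =>
    by_cases h : x = k
    · simp [h, ih]; ring
    · simp [h, ih]

-- the seen-set component of B's fold is s updated with the processed names
theorem bfold_fst (counts : PySem.Dict String Int)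
    (l : List (String × Int × String)) (s : PySem.Set String) (t : Int) :
    (l.foldl
      (fun (st : PySem.Set String × Int) item =>
        if PySem.Set.contains st.1 item.1 then st
        else (PySem.Set.add st.1 item.1, st.2 + item.2.1 * counts.getD item.1 0))
      (s, t)).1 = PySem.Set.update s (l.map (·.1)) := by
  induction l generalizing s t with
  | nil => simp [PySem.Set.update]
  | cons y l ih =>
    simp only [List.foldl_cons, List.map_cons, PySem.Set.update_cons]
    by_cases h : PySem.Set.contains s y.1 = true
    · rw [if_pos h, ih, PySem.Set.add_of_mem ((PySem.Set.contains_iff _ _).mp h)]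
    · rw [if_neg h, ih]

-- B's fold from seen-set s accumulates exactly the dict-sum over purchases outside s
theorem bfold_eq (pur : List String) (inv : List (String × Int × String))
    (s : PySem.Set String) (t : Int) :
    (inv.reverse.foldl
      (fun (st : PySem.Set String × Int) item =>
        if PySem.Set.contains st.1 item.1 then st
        else (PySem.Set.add st.1 item.1,
              st.2 + item.2.1 * (PySem.Dict.counter pur).getD item.1 0))
      (s, t)).2
      = t + ((pur.filter (fun p => !(PySem.Set.contains s p))).map
          (fun p => (inv.foldl (fun d q => d.insert q.1 q.2.1)
              (PySem.Dict.empty : PySem.Dict String Int)).getD p 0)).sum := by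
  induction inv generalizing s t with
  | nil => simp
  | cons x rest ih =>
    simp only [List.reverse_cons, List.foldl_append, List.foldl_cons, List.foldl_nil]
    rw [bfold_fst]
    have hmem : ∀ k, k ∈ PySem.Set.update s (rest.reverse.map (·.1)) ↔
        k ∈ s ∨ k ∈ rest.map (·.1) := by
      intro k
      rw [PySem.Set.mem_update]
      simp [List.map_reverse]
    by_cases hx : x.1 ∈ s ∨ x.1 ∈ rest.map (·.1)
    · have hcb : PySem.Set.contains (PySem.Set.update s (rest.reverse.map (·.1))) x.1 = true :=
        (PySem.Set.contains_iff _ _).mpr ((hmem x.1).mpr hx)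
      simp only [hcb, if_true]
      rw [ih]
      congr 1
      apply congrArg
      apply List.map_congr_left
      intro p hp
      have hps : PySem.Set.contains s p = false := by
        rcases List.mem_filter.mp hp with ⟨_, h2⟩
        simpa using h2
      have hpns : p ∉ s := by
        intro hm
        rw [(PySem.Set.contains_iff _ _).mpr hm] at hps
        cases hps
      rw [getD_foldl_insert_override rest (PySem.Dict.empty.insert x.1 x.2.1) p]
      by_cases hpl : p ∈ rest.map (·.1)
      · rw [getD_foldl_insert_override rest PySem.Dict.empty p]
        simp [hpl]
      · have hpx : p ≠ x.1 := by
          rintro rfl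
          rcases hx with h | h
          · exact hpns h
          · exact hpl h
        rw [getD_foldl_insert_override rest PySem.Dict.empty p]
        simp [hpl, PySem.Dict.getD_insert, hpx]
    · have hcb : PySem.Set.contains (PySem.Set.update s (rest.reverse.map (·.1))) x.1 = false := by
        cases hcc : PySem.Set.contains (PySem.Set.update s (rest.reverse.map (·.1))) x.1
        · rfl
        · exact absurd ((hmem x.1).mp ((PySem.Set.contains_iff _ _).mp hcc)) hx
      rw [not_or] at hx
      obtain ⟨hxs, hxr⟩ := hx
      simp only [hcb, Bool.false_eq_true, if_false]
      rw [ih]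
      have hpoint : ∀ p ∈ pur.filter (fun p => !(PySem.Set.contains s p)),
          (rest.foldl (fun d q => d.insert q.1 q.2.1)
              (PySem.Dict.empty.insert x.1 x.2.1)).getD p 0
            = (rest.foldl (fun d q => d.insert q.1 q.2.1)
                (PySem.Dict.empty : PySem.Dict String Int)).getD p 0
              + (if p = x.1 then x.2.1 else 0) := by
        intro p _
        rw [getD_foldl_insert_override rest (PySem.Dict.empty.insert x.1 x.2.1) p,
            getD_foldl_insert_override rest PySem.Dict.empty p]
        by_cases hpl : p ∈ rest.map (·.1)
        · have hpx : p ≠ x.1 := fun h => hxr (h ▸ hpl)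
          simp [hpl, hpx]
        · by_cases hpx : p = x.1
          · subst hpx
            simp [hpl]
          · simp [hpl, hpx, PySem.Dict.getD_insert]
      rw [List.map_congr_left hpoint, PySem.List.sum_map_add_int, sum_map_if_eq]
      have hcount : (pur.filter (fun p => !(PySem.Set.contains s p))).count x.1
          = pur.count x.1 := by
        apply List.count_filter
        simp [PySem.Set.contains_eq_listContains]
        intro h
        exact absurd (by simpa using h : x.1 ∈ s) hxs
      rw [hcount, PySem.Dict.getD_counter]
      ring

-- ===== VERDICT (by name: the statement is the Claim_ definition above) =====
theorem store_checkout_spec : Claim_equal_store_checkout := by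
  intro inv pur _
  unfold Spec_store_checkout store_checkout store_checkout_alt
  rw [foldA_eq_sum_map, bfold_eq pur inv PySem.Set.empty 0]
  simp [PySem.Set.empty, PySem.Set.contains_eq_listContains]
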